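-- pv_equiv track=rewrite | github.com/rec/recs | test/audio/test_channel_writer.py | _on_and_off_segments
-- ===== SOURCE A (Python) =====
-- def _on_and_off_segments(it):
--     pb = False
--     pi = 0
--
--     if it := list(it):
--         for i, x in enumerate(it):
--             if (b := bool(x)) != pb:
--                 yield i - pi
--                 pb = b
--                 pi = i
--         yield i + 1 - pi
-- ===== SOURCE B (Python) =====
-- def _run_lengths(bs):
--     out = []
--     i = 0
--     n = len(bs)
--     while i < n:
--         j = i
--         while j < n and bs[j] == bs[i]:
--             j += 1
--         out.append(j - i)
--         i = j
--     return out
--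
--
-- def _on_and_off_segments(it):
--     bs = [bool(x) for x in it]
--     if not bs:
--         return
--     if bs[0]:
--         yield 0
--     yield from _run_lengths(bs)
-- ===== Notes on version B (the rewrite author's own statement) =====
-- stated objective: simpler
-- what changed: Replaces A's transition-detecting state machine (previous-bool/previous-index/yield-on-change) with a boolean map followed by an explicit run-splitting pass that appends each run's length, plus a leading 0 emitted iff the first element is truthy.
import Mathlib
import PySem

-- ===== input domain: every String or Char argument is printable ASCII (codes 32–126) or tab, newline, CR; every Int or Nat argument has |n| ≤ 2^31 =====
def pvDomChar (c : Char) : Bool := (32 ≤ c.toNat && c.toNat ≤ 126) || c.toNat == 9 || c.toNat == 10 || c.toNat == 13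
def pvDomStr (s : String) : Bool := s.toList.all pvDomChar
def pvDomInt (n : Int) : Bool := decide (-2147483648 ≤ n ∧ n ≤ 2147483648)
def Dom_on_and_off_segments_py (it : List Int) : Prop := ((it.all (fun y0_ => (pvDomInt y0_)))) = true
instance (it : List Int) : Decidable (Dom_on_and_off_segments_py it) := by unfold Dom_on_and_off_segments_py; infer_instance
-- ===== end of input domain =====

-- B replaces A's transition-detecting state machine by a boolean map plus an
-- explicit run-splitting pass (run lengths, with a leading 0 when the sequence
-- starts "on"); objective: simpler.


-- ===== PORT A =====
-- A's for-loop with state (pb, pi) and running index i; the trailing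
-- `yield i + 1 - pi` becomes the base case (there i = last index + 1).
def onOffGoA : List Int → Bool → Int → Int → List Int
  | [], _pb, pi, i => [i - pi]
  | x :: rest, pb, pi, i =>
      let b : Bool := decide (x ≠ 0)
      if b ≠ pb then (i - pi) :: onOffGoA rest b i (i + 1)
      else onOffGoA rest pb pi (i + 1)

def on_and_off_segments_py (it : List Int) : List Int :=
  if it = [] then [] else onOffGoA it false 0 0

-- ===== PORT B =====
-- measure lemma needed by runLengths' recursion (cited in decreasing_by)
def takeRunB (b : Bool) : List Bool → Int × List Bool
  | [] => (0, [])
  | y :: ys => if y = b then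
      let p := takeRunB b ys
      (p.1 + 1, p.2)
    else (0, y :: ys)

theorem takeRunB_length_le (b : Bool) (ys : List Bool) :
    (takeRunB b ys).2.length ≤ ys.length := by
  induction ys with
  | nil => simp [takeRunB]
  | cons y ys ih =>
      simp only [takeRunB]
      split
      · exact Nat.le_succ_of_le ih
      · simp

def runLengthsB : List Bool → List Int
  | [] => []
  | x :: ys =>
      let p := takeRunB x ys
      (p.1 + 1) :: runLengthsB p.2
  termination_by bs => bs.length
  decreasing_by
    exact Nat.lt_succ_of_le (takeRunB_length_le x ys)

def on_and_off_segments_py_alt (it : List Int) : List Int :=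
  let bs := it.map (fun x => decide (x ≠ 0))
  match bs with
  | [] => []
  | b0 :: _ => (if b0 then [(0 : Int)] else []) ++ runLengthsB bs

-- ===== PRECONDITION & SPEC =====
def Spec_on_and_off_segments_py (it : List Int) (out : List Int) : Prop := out = on_and_off_segments_py_alt it
instance (it : List Int) (out : List Int) : Decidable (Spec_on_and_off_segments_py it out) := by unfold Spec_on_and_off_segments_py; infer_instance

-- ===== CLAIM (what is proved, stated in full; the proofs are below) =====
def Claim_equal_on_and_off_segments_py : Prop := ∀ (it : List Int), Dom_on_and_off_segments_py it → Spec_on_and_off_segments_py it (on_and_off_segments_py it)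

-- ===== LEMMAS AND PROOFS =====

theorem runLengthsB_nil : runLengthsB [] = [] := by
  simp only [runLengthsB]

theorem runLengthsB_cons (x : Bool) (ys : List Bool) :
    runLengthsB (x :: ys) =
      ((takeRunB x ys).1 + 1) :: runLengthsB (takeRunB x ys).2 := by
  simp only [runLengthsB]

-- Invariant of A's loop: with current run value pb started at position pi and
-- current index i, the loop emits the open run's final length followed by the
-- run lengths of the rest.
theorem onOffGoA_eq (xs : List Int) : ∀ (pb : Bool) (pi i : Int),
    onOffGoA xs pb pi i =
      (i + (takeRunB pb (xs.map (fun x => decide (x ≠ 0)))).1 - pi) ::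
        runLengthsB (takeRunB pb (xs.map (fun x => decide (x ≠ 0)))).2 := by
  induction xs with
  | nil =>
      intro pb pi i
      simp only [onOffGoA, List.map_nil, takeRunB, runLengthsB_nil]
      norm_num
  | cons x rest ih =>
      intro pb pi i
      simp only [onOffGoA, List.map_cons, takeRunB]
      by_cases h : (decide (x ≠ 0) : Bool) = pb
      · rw [h, if_neg (fun hc => hc rfl), if_pos rfl, ih]
        congr 1
        ring
      · rw [if_pos h, if_neg h, ih, runLengthsB_cons]
        congr 1
        · ring
        · congr 1
          ring

-- ===== VERDICT (by name: the statement is the Claim_ definition above) =====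
theorem on_and_off_segments_py_spec : Claim_equal_on_and_off_segments_py := by
  intro it _
  unfold Spec_on_and_off_segments_py on_and_off_segments_py on_and_off_segments_py_alt
  cases it with
  | nil => rfl
  | cons x rest =>
      rw [if_neg (List.cons_ne_nil x rest), onOffGoA_eq]
      simp only [List.map_cons]
      cases hb : (decide (x ≠ 0) : Bool) with
      | false =>
          -- first element falsy: A's open run (value false) absorbs the head
          simp only [takeRunB, Bool.false_eq_true, if_false, List.nil_append,
            runLengthsB_cons]
          congr 1
          norm_num
      | true =>
          -- first element truthy: A emits the zero-length leading off run
          simp only [takeRunB, if_neg (by simp : ¬(true = false))]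
          norm_num
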